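-- pv_equiv track=rewrite | github.com/8n8/trumat | rules.py | remove_space_before_equals
-- ===== SOURCE A (Python) =====
-- def remove_space_before_equals(old):
--     new = ""
--     for i, c in enumerate(old):
--         if c == "=":
--             if old[i - 1] == " ":
--                 new = new[:-1]
--
--         new += c
--
--     return new, None
-- ===== SOURCE B (Python) =====
-- def remove_space_before_equals(old):
--     # Forward pairwise pass: drop each char that is a space immediately
--     # followed by '='; no accumulator backtracking.
--     kept = [c for c, nxt in zip(old, old[1:]) if not (c == " " and nxt == "=")]
--     if old:
--         kept.append(old[-1])
--     return "".join(kept), None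
-- ===== Notes on version B (the rewrite author's own statement) =====
-- stated objective: simpler
-- what changed: Replaces the append-then-backtrack loop (index into old, slice off the accumulator's last char) with a single forward pairwise pass over zip(old, old[1:]) that simply skips a space whose successor is '='.
import Mathlib
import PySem

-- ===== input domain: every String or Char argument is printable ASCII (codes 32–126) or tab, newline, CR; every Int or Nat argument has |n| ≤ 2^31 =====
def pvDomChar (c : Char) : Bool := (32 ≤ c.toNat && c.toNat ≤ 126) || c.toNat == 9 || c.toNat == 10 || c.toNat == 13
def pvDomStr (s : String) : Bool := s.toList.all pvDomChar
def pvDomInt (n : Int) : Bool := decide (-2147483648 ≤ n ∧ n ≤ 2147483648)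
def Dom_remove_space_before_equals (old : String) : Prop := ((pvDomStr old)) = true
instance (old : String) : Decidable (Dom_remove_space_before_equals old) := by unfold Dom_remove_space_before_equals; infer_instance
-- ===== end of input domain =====

-- B replaces A's append-then-backtrack loop by a forward pairwise pass that skips a space followed by '='; same result, simpler.


-- ===== PORT A =====
-- new[:-1] on a string is dropLast; old[i-1] is pyGet? (negative-index wraparound included)
def remove_space_before_equals (old : String) : String × Option String :=
  let s := old.toList
  let new := (PySem.List.enumerate s 0).foldl (fun new (p : Int × Char) =>
    let new := if p.2 = '=' then
        (if PySem.List.pyGet? s (p.1 - 1) = some ' ' then new.dropLast else new)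
      else new
    new ++ [p.2]) []
  (String.ofList new, none)

-- ===== PORT B =====
-- old[1:] is drop 1 (exact: nonnegative slice start); old[-1] under 'if old' is getLast?
def remove_space_before_equals_alt (old : String) : String × Option String :=
  let s := old.toList
  let kept := ((s.zip (s.drop 1)).filter (fun p => !(p.1 == ' ' && p.2 == '='))).map (·.1)
  let kept := if s.isEmpty then kept else kept ++ s.getLast?.toList
  (String.ofList kept, none)

-- ===== PRECONDITION & SPEC =====
def Spec_remove_space_before_equals (old : String) (out : String × Option String) : Prop := out = remove_space_before_equals_alt old
instance (old : String) (out : String × Option String) : Decidable (Spec_remove_space_before_equals old out) := by unfold Spec_remove_space_before_equals; infer_instance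

-- ===== CLAIM (what is proved, stated in full; the proofs are below) =====
def Claim_equal_remove_space_before_equals : Prop := ∀ (old : String), Dom_remove_space_before_equals old → Spec_remove_space_before_equals old (remove_space_before_equals old)

-- ===== LEMMAS AND PROOFS =====

-- Reference function: pairwise recursion on the front of the list.
def refRSBE : List Char → List Char
  | [] => []
  | [c] => [c]
  | a :: b :: t => (if a = ' ' ∧ b = '=' then [] else [a]) ++ refRSBE (b :: t)

theorem refRSBE_ne_nil (a : Char) (t : List Char) : refRSBE (a :: t) ≠ [] := by
  induction t generalizing a with
  | nil => simp [refRSBE]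
  | cons b t ih =>
    simp only [refRSBE]
    intro h
    rcases List.append_eq_nil_iff.1 h with ⟨_, h2⟩
    exact ih b h2

theorem refRSBE_snoc (t : List Char) (c : Char) :
    refRSBE (t ++ [c]) =
      (if c = '=' ∧ t.getLast? = some ' ' then (refRSBE t).dropLast else refRSBE t) ++ [c] := by
  induction t with
  | nil => simp [refRSBE]
  | cons a t ih =>
    cases t with
    | nil =>
      by_cases ha : a = ' ' <;> by_cases hc : c = '=' <;>
        simp [refRSBE, ha, hc]
    | cons b t' =>
      have hne : refRSBE (b :: t') ≠ [] := refRSBE_ne_nil b t'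
      have h1 : (a :: b :: t') ++ [c] = a :: ((b :: t') ++ [c]) := by simp
      rw [h1]
      have h2 : ∀ u : List Char, refRSBE (a :: b :: u) =
          (if a = ' ' ∧ b = '=' then [] else [a]) ++ refRSBE (b :: u) := by
        intro u; simp [refRSBE]
      have h3 : (b :: t') ++ [c] = b :: (t' ++ [c]) := by simp
      rw [show a :: ((b :: t') ++ [c]) = a :: b :: (t' ++ [c]) by simp, h2, ← h3, ih,
        List.getLast?_cons_cons, h2]
      by_cases hcond : c = '=' ∧ (b :: t').getLast? = some ' '
      · simp [hcond, List.dropLast_append_of_ne_nil hne]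
      · simp [hcond]

-- B's kept-list equals refRSBE.
theorem bkept_eq_ref (s : List Char) :
    ((s.zip (s.drop 1)).filter (fun p => !(p.1 == ' ' && p.2 == '='))).map (·.1)
      ++ s.getLast?.toList = refRSBE s := by
  induction s with
  | nil => simp [refRSBE]
  | cons a t ih =>
    cases t with
    | nil => simp [refRSBE]
    | cons b t' =>
      simp only [List.drop_succ_cons, List.drop_zero, List.zip_cons_cons, List.filter_cons,
        List.getLast?_cons_cons, refRSBE]
      by_cases h : a = ' ' ∧ b = '='
      · simpa [h] using ih
      · have hb : (!(a == ' ' && b == '=')) = true := by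
          simp only [Bool.not_eq_eq_eq_not, Bool.not_true, Bool.and_eq_false_iff, beq_eq_false_iff_ne]
          tauto
        simpa [hb, h] using ih

-- A's fold over a suffix, given the prefix already processed, yields refRSBE of the whole.
theorem afold_main (s u t : List Char) (h : s = t ++ u) :
    (PySem.List.enumerate u (t.length : Int)).foldl (fun new (p : Int × Char) =>
        (if p.2 = '=' then
            (if PySem.List.pyGet? s (p.1 - 1) = some ' ' then new.dropLast else new)
          else new) ++ [p.2]) (refRSBE t)
      = refRSBE (t ++ u) := by
  induction u generalizing t with
  | nil => simp
  | cons c u ih =>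
    rw [PySem.List.enumerate_cons, List.foldl_cons]
    have hstep : (if c = '=' then
        (if PySem.List.pyGet? s ((t.length : Int) - 1) = some ' ' then (refRSBE t).dropLast
          else refRSBE t) else refRSBE t) ++ [c] = refRSBE (t ++ [c]) := by
      rw [refRSBE_snoc]
      cases t with
      | nil =>
        -- index -1 is Python's wraparound old[-1]; harmless: refRSBE [] = [] and dropLast [] = []
        by_cases hc : c = '=' <;> simp [refRSBE, hc]
      | cons a t' =>
        have hget : PySem.List.pyGet? s ((((a :: t').length : Nat) : Int) - 1)
            = (a :: t').getLast? := by
          have hlen : (((a :: t').length : Nat) : Int) - 1 = (((a :: t').length - 1 : Nat) : Int) := by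
            simp [List.length_cons]
          rw [hlen, PySem.List.pyGet?_natCast, h]
          rw [List.getElem?_append_left (by simp [List.length_cons])]
          rw [List.getLast?_eq_getElem?]
        rw [hget]
        by_cases hcond : c = '=' ∧ (a :: t').getLast? = some ' '
        · simp [hcond.1, hcond.2]
        · by_cases hc : c = '='
          · have hl : ¬ (a :: t').getLast? = some ' ' := fun hl => hcond ⟨hc, hl⟩
            simp [hc, hl]
          · simp [hc]
    rw [hstep]
    have h' : s = (t ++ [c]) ++ u := by simp [h]
    have := ih (t ++ [c]) h'
    simpa using this

-- list-level combination of the two sides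
theorem core_eq (s : List Char) :
    (PySem.List.enumerate s 0).foldl (fun new (p : Int × Char) =>
        (if p.2 = '=' then
            (if PySem.List.pyGet? s (p.1 - 1) = some ' ' then new.dropLast else new)
          else new) ++ [p.2]) []
      = (if s.isEmpty then
           ((s.zip (s.drop 1)).filter (fun p => !(p.1 == ' ' && p.2 == '='))).map (·.1)
         else ((s.zip (s.drop 1)).filter (fun p => !(p.1 == ' ' && p.2 == '='))).map (·.1)
              ++ s.getLast?.toList) := by
  have hA := afold_main s s [] rfl
  simp only [List.length_nil, Nat.cast_zero, refRSBE, List.nil_append] at hA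
  rw [hA]
  cases s with
  | nil => simp [refRSBE]
  | cons a t =>
    rw [← bkept_eq_ref (a :: t)]
    simp

-- ===== VERDICT (by name: the statement is the Claim_ definition above) =====
theorem remove_space_before_equals_spec : Claim_equal_remove_space_before_equals := by
  intro old _
  unfold Spec_remove_space_before_equals remove_space_before_equals remove_space_before_equals_alt
  dsimp only
  rw [core_eq old.toList]
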